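-- pv_equiv track=rewrite | github.com/Lee-Hughs/checkers.py | train.py | get_pawn_score
-- ===== SOURCE A (Python) =====
-- def get_pawn_score(board, player, w):
--     score = 0
--     enemy = ("Rr" if (player == "Bb") else "Bb")
--     for (i, row) in enumerate(board):
--         for (j, value) in enumerate(row):
--             ##square is empty
--             if(value == None):
--                 continue
--             #square has a piece
--             if(value == player[1]):
--                 score += w
--                 continue
--             if(value == enemy[1]):
--                 score -= w
--     return score
-- ===== SOURCE B (Python) =====
-- def get_pawn_score(board, player, w):
--     mine = player[1]
--     foe = "r" if player == "Bb" else "b"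
--     flat = [v for row in board for v in row]
--     return w * (flat.count(mine) - flat.count(foe))
-- ===== Notes on version B (the rewrite author's own statement) =====
-- stated objective: simpler
-- what changed: Replaces the nested per-cell +/- branching loop by flattening the board and computing the score in closed form, w * (count(mine) - count(foe)); Pre_ excludes players shorter than 2 chars (A raises IndexError except when it accidentally never reads player[1]) and the degenerate players whose own pawn letter equals the enemy's pawn letter, where either score is defensible.
-- outside the precondition, e.g. on get_pawn_score([[None]], 'B', 3): A returns 0, B raises IndexError; on get_pawn_score([['b']], 'Rb', 1): A returns 1, B returns 0
import Mathlib
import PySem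

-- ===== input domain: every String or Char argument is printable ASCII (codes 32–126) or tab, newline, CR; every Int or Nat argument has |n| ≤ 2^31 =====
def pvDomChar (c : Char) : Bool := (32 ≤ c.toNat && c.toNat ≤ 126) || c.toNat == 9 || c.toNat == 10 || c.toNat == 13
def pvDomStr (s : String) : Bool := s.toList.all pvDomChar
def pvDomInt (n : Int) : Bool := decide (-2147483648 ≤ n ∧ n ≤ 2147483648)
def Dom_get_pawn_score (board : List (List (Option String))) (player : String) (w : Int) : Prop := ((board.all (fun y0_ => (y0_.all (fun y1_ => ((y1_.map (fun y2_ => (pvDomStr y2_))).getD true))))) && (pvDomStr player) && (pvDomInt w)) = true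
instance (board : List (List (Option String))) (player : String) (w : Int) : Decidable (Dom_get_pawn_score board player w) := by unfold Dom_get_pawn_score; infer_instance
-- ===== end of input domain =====

-- B flattens the board and computes the score in closed form from two element counts
-- instead of A's nested per-cell +/- branching loop (objective: simpler).


-- ===== PORT A =====
def get_pawn_score (board : List (List (Option String))) (player : String) (w : Int) : Int :=
  let enemy := if player == "Bb" then "Rr" else "Bb"
  -- player[1] / enemy[1] as Option one-char strings (none = IndexError, excluded by Pre_)
  let p1 : Option String := (PySem.Str.pyGet? player 1).map (fun c => String.ofList [c])
  let e1 : Option String := (PySem.Str.pyGet? enemy 1).map (fun c => String.ofList [c])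
  board.foldl (fun score row =>
    row.foldl (fun score value =>
      if value = none then score
      else if value = p1 then score + w
      else if value = e1 then score - w
      else score) score) 0

-- ===== PORT B =====
def get_pawn_score_alt (board : List (List (Option String))) (player : String) (w : Int) : Int :=
  -- mine = player[1] (none = IndexError, excluded by Pre_)
  let mine : Option String := (PySem.Str.pyGet? player 1).map (fun c => String.ofList [c])
  let foe : String := if player == "Bb" then "r" else "b"
  let flat := board.flatMap id
  w * ((PySem.List.count flat mine : Int) - (PySem.List.count flat (some foe) : Int))

-- ===== PRECONDITION & SPEC =====
-- Pre_ excludes players shorter than 2 characters (there A raises IndexError on player[1]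
-- on any non-None cell, and only by lazy accident returns 0 on an all-None board, while B
-- indexes player[1] up front and raises), and the degenerate players whose own pawn letter
-- equals the enemy's pawn letter (player ≠ "Bb" with player[1] = 'b'), a corner no caller
-- specifies and where A's branch order makes its value accidental.
def Pre_get_pawn_score (board : List (List (Option String))) (player : String) (w : Int) : Prop :=
  2 ≤ player.length ∧ (player = "Bb" ∨ player.toList[1]? ≠ some 'b')
instance (board : List (List (Option String))) (player : String) (w : Int) : Decidable (Pre_get_pawn_score board player w) := by unfold Pre_get_pawn_score; infer_instance

def pvWitness_get_pawn_score : List (List (Option String)) × String × Int :=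
  ([[some "r", none], [some "b"]], "Bb", 2)

def Spec_get_pawn_score (board : List (List (Option String))) (player : String) (w : Int) (out : Int) : Prop := out = get_pawn_score_alt board player w
instance (board : List (List (Option String))) (player : String) (w : Int) (out : Int) : Decidable (Spec_get_pawn_score board player w out) := by unfold Spec_get_pawn_score; infer_instance

-- ===== CLAIM (what is proved, stated in full; the proofs are below) =====
def Claim_equal_get_pawn_score : Prop := ∀ (board : List (List (Option String))) (player : String) (w : Int), Dom_get_pawn_score board player w → Pre_get_pawn_score board player w → Spec_get_pawn_score board player w (get_pawn_score board player w)

-- ===== LEMMAS AND PROOFS =====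

-- A's inner loop body over one flat list, when the two target cells are distinct,
-- adds w per p-cell and subtracts w per e-cell.
theorem foldl_cells_ne (p e : Option String) (hp : p ≠ none) (he : e ≠ none)
    (hne : p ≠ e) (w : Int) (l : List (Option String)) (s : Int) :
    l.foldl (fun score value =>
      if value = none then score
      else if value = p then score + w
      else if value = e then score - w
      else score) s
    = s + w * (l.count p : Int) - w * (l.count e : Int) := by
  induction l generalizing s with
  | nil => simp
  | cons a l ih =>
    simp only [List.foldl_cons, List.count_cons, ih]
    by_cases hn : a = none
    · subst hn
      simp [Ne.symm hp, Ne.symm he, beq_iff_eq]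
    · by_cases hpa : a = p
      · subst hpa
        simp [hn, hne, beq_iff_eq]
        push_cast; ring
      · by_cases hea : a = e
        · subst hea
          simp [hn, hpa, beq_iff_eq]
          push_cast; ring
        · simp [hn, hpa, hea, beq_iff_eq]

-- the nested fold over rows equals the fold over the flattened board.
theorem foldl_rows (f : Int → Option String → Int)
    (board : List (List (Option String))) (s : Int) :
    board.foldl (fun score row => row.foldl f score) s
    = (board.flatMap id).foldl f s := by
  induction board generalizing s with
  | nil => simp
  | cons r rs ih => simp [List.foldl_append, ih]

-- ===== VERDICT (by name: the statement is the Claim_ definition above) =====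
theorem get_pawn_score_spec : Claim_equal_get_pawn_score := by
  intro board player w _ hpre
  obtain ⟨hlen2, hne'⟩ := hpre
  unfold Spec_get_pawn_score get_pawn_score get_pawn_score_alt
  have hlen : 2 ≤ player.toList.length := by
    rw [String.length_toList]; exact hlen2
  obtain ⟨a, b, t, hpl⟩ : ∃ a b t, player.toList = a :: b :: t := by
    rcases h : player.toList with _ | ⟨a, _ | ⟨b, t⟩⟩
    · rw [h] at hlen; simp at hlen
    · rw [h] at hlen; simp at hlen
    · exact ⟨a, b, t, rfl⟩
  have hget : PySem.Str.pyGet? player 1 = some b := by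
    simpa [hpl] using PySem.Str.pyGet?_natCast player 1
  have hget2 : PySem.Str.pyGet? (if player == "Bb" then "Rr" else "Bb") 1
      = some (if player == "Bb" then 'r' else 'b') := by
    by_cases h : (player == "Bb") = true
    · rw [if_pos h, if_pos h]; decide
    · rw [if_neg h, if_neg h]; decide
  have hfoeStr : (String.ofList [if player == "Bb" then 'r' else 'b'])
      = (if player == "Bb" then "r" else "b") := by
    by_cases h : (player == "Bb") = true
    · rw [if_pos h, if_pos h]
    · rw [if_neg h, if_neg h]
  have hmf : (some (String.ofList [b]) : Option String)
      ≠ some (if player == "Bb" then "r" else "b") := by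
    by_cases h : (player == "Bb") = true
    · have hp : player = "Bb" := eq_of_beq h
      subst hp
      have h2 : (['B', 'b'] : List Char) = a :: b :: t := by simpa using hpl
      simp only [List.cons.injEq] at h2
      obtain ⟨-, hb, -⟩ := h2
      rw [if_pos h, ← hb]
      decide
    · rw [if_neg h]
      rcases hne' with heq | hnb
      · exact absurd (by simp [heq]) h
      · rw [hpl] at hnb
        simp at hnb
        intro hc
        apply hnb
        have hc' : String.ofList [b] = "b" := Option.some_injective _ hc
        have := congrArg String.toList hc'
        simpa using this
  simp only [hget, hget2, Option.map_some, hfoeStr, foldl_rows, PySem.List.count_eq]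
  rw [foldl_cells_ne (some (String.ofList [b]))
      (some (if player == "Bb" then "r" else "b")) (by simp) (by simp) hmf w]
  ring
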